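-- pv_equiv track=rewrite | github.com/Ralf-Kemmann/Quantum-Spacetime-Bridge | numerics/debroglie-phase-bridge/typ_b_analysis/src/run_n1_alt_neighborhood_v1.py | classify_activity
-- ===== SOURCE A (Python) =====
-- def classify_activity(statuses: list[str]) -> str:
--     if not statuses:
--         return "not_applicable"
--     if all(s == "not_applicable" for s in statuses):
--         return "not_applicable"
--     if any(s == "active" for s in statuses):
--         return "active"
--     if any(s == "partial" for s in statuses):
--         return "partial"
--     if any(s == "weak" for s in statuses):
--         return "weak"
--     return "inactive"
-- ===== SOURCE B (Python) =====
-- def _rank(s):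
--     if s == "active":
--         return 0
--     if s == "partial":
--         return 1
--     if s == "weak":
--         return 2
--     return 3
--
--
-- def classify_activity(statuses: list[str]) -> str:
--     best = 3
--     all_na = True
--     for s in statuses:
--         if s != "not_applicable":
--             all_na = False
--             r = _rank(s)
--             if r < best:
--                 best = r
--     if all_na:
--         return "not_applicable"
--     if best == 0:
--         return "active"
--     if best == 1:
--         return "partial"
--     if best == 2:
--         return "weak"
--     return "inactive"
-- ===== Notes on version B (the rewrite author's own statement) =====
-- stated objective: alternative
-- what changed: A makes up to four sequential scans (all/any x3); B does one accumulating pass keeping the minimum priority rank seen plus an all-not_applicable flag, then maps the rank back to a label.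
import Mathlib
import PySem

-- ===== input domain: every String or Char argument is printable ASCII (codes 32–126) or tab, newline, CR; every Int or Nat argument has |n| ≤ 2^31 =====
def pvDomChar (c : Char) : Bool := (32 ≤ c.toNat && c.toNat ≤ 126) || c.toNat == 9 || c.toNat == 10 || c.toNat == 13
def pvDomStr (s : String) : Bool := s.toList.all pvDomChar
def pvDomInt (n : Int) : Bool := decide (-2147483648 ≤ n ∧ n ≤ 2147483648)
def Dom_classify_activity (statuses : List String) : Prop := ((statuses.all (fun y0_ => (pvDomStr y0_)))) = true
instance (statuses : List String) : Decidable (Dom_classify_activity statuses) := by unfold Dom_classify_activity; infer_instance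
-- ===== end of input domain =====

-- B replaces A's up-to-four sequential list scans by one accumulating pass (min priority rank + all-not_applicable flag); alternative decomposition, same cost.


-- ===== PORT A =====
def classify_activity (statuses : List String) : String :=
  if statuses = [] then "not_applicable"
  else if statuses.all (fun s => s == "not_applicable") then "not_applicable"
  else if statuses.any (fun s => s == "active") then "active"
  else if statuses.any (fun s => s == "partial") then "partial"
  else if statuses.any (fun s => s == "weak") then "weak"
  else "inactive"

-- ===== PORT B =====
def pvRank (s : String) : Int :=
  if s = "active" then 0
  else if s = "partial" then 1
  else if s = "weak" then 2
  else 3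

def pvStep (acc : Int × Bool) (s : String) : Int × Bool :=
  if s ≠ "not_applicable" then
    ((if pvRank s < acc.1 then pvRank s else acc.1), false)
  else acc

def classify_activity_alt (statuses : List String) : String :=
  let st := statuses.foldl pvStep (3, true)
  if st.2 then "not_applicable"
  else if st.1 = 0 then "active"
  else if st.1 = 1 then "partial"
  else if st.1 = 2 then "weak"
  else "inactive"

-- ===== PRECONDITION & SPEC =====
def Spec_classify_activity (statuses : List String) (out : String) : Prop := out = classify_activity_alt statuses
instance (statuses : List String) (out : String) : Decidable (Spec_classify_activity statuses out) := by unfold Spec_classify_activity; infer_instance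

-- ===== CLAIM (what is proved, stated in full; the proofs are below) =====
def Claim_equal_classify_activity : Prop := ∀ (statuses : List String), Dom_classify_activity statuses → Spec_classify_activity statuses (classify_activity statuses)

-- ===== LEMMAS AND PROOFS =====

-- the value A's any-chain would pick, as a rank
def pvM (l : List String) : Int :=
  if l.any (fun s => s == "active") then 0
  else if l.any (fun s => s == "partial") then 1
  else if l.any (fun s => s == "weak") then 2
  else 3

lemma pvM_bounds (l : List String) : 0 ≤ pvM l ∧ pvM l ≤ 3 := by
  unfold pvM; split_ifs <;> omega

lemma pv_snd_fold (l : List String) : ∀ b f, (l.foldl pvStep (b, f)).2 = (f && l.all (fun s => s == "not_applicable")) := by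
  induction l with
  | nil => intro b f; simp
  | cons s t ih =>
    intro b f
    simp only [List.foldl_cons, List.all_cons, pvStep]
    by_cases hs : s = "not_applicable"
    · simp [hs, ih]
    · have : (s == "not_applicable") = false := by simpa using hs
      simp [hs, this, ih, Bool.and_false]

lemma pv_fst_fold (l : List String) : ∀ b : Int, ∀ f : Bool, b ≤ 3 →
    (l.foldl pvStep (b, f)).1 = min b (pvM l) := by
  induction l with
  | nil =>
    intro b f hb
    have := pvM_bounds ([] : List String)
    simp [pvM]; omega
  | cons s t ih =>
    intro b f hb
    have hMt := pvM_bounds t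
    simp only [List.foldl_cons, pvStep]
    by_cases hna : s = "not_applicable"
    · have hs : (s ≠ "not_applicable") = False := by simp [hna]
      rw [if_neg (by simp [hna])]
      rw [ih b f hb]
      have : pvM (s :: t) = pvM t := by
        unfold pvM; simp [hna]
      rw [this]
    · rw [if_pos hna]
      have hr : 0 ≤ pvRank s ∧ pvRank s ≤ 3 := by unfold pvRank; split_ifs <;> omega
      have hb' : (if pvRank s < b then pvRank s else b) ≤ 3 := by split_ifs <;> omega
      rw [ih _ false hb']
      by_cases ha : s = "active"
      · have : pvM (s :: t) = 0 := by unfold pvM; simp [ha]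
        rw [this]; simp [pvRank, ha]; omega
      · by_cases hp : s = "partial"
        · have hRk : pvRank s = 1 := by simp [pvRank, hp]
          have : pvM (s :: t) = (if t.any (fun s => s == "active") then 0 else 1) := by
            unfold pvM; simp [hp]
          rw [this, hRk]
          unfold pvM
          by_cases hA : t.any (fun s => s == "active") = true <;> simp [hA] <;> split_ifs <;> omega
        · by_cases hw : s = "weak"
          · have hRk : pvRank s = 2 := by simp [pvRank, hw]
            have : pvM (s :: t) =
                (if t.any (fun s => s == "active") then 0
                 else if t.any (fun s => s == "partial") then 1 else 2) := by
              unfold pvM; simp [hw]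
            rw [this, hRk]
            unfold pvM
            by_cases hA : t.any (fun s => s == "active") = true <;>
              by_cases hP : t.any (fun s => s == "partial") = true <;>
                simp [hA, hP] <;> split_ifs <;> omega
          · have hRk : pvRank s = 3 := by simp [pvRank, hw, hp, ha]
            have : pvM (s :: t) = pvM t := by
              unfold pvM; simp [hw, hp, ha]
            rw [this, hRk]
            omega

-- ===== VERDICT (by name: the statement is the Claim_ definition above) =====
theorem classify_activity_spec : Claim_equal_classify_activity := by
  intro statuses _
  unfold Spec_classify_activity classify_activity classify_activity_alt
  have hsnd := pv_snd_fold statuses 3 true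
  have hfst := pv_fst_fold statuses 3 true (by omega)
  have hMb := pvM_bounds statuses
  simp only [Bool.true_and] at hsnd
  by_cases hnil : statuses = []
  · subst hnil; decide
  · rw [if_neg hnil]
    by_cases hall : statuses.all (fun s => s == "not_applicable") = true
    · simp [hall, hsnd]
    · have hall' : statuses.all (fun s => s == "not_applicable") = false := by
        simpa using hall
      rw [if_neg (by simp [hall'])]
      have hmin : min (3 : Int) (pvM statuses) = pvM statuses := by omega
      rw [hmin] at hfst
      simp only [hsnd, hall']
      unfold pvM at hfst
      by_cases hA : statuses.any (fun s => s == "active") = true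
      · simp [hA] at hfst ⊢; simp [hfst]
      · rw [if_neg (by simpa using hA)]
        rw [if_neg hA] at hfst
        by_cases hP : statuses.any (fun s => s == "partial") = true
        · simp [hP] at hfst ⊢; simp [hfst]
        · rw [if_neg (by simpa using hP)]
          rw [if_neg hP] at hfst
          by_cases hW : statuses.any (fun s => s == "weak") = true
          · simp [hW] at hfst ⊢; simp [hfst]
          · rw [if_neg (by simpa using hW)]
            rw [if_neg hW] at hfst
            simp [hfst]
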